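-- pv_equiv track=rewrite | github.com/KinomotoMio/ZhiYan | skills/slidev-deck-quality/scripts/review_deck.py | _class_inferred_contrast_pair
-- ===== SOURCE A (Python) =====
-- def _class_inferred_contrast_pair(classes: list[str]) -> tuple[tuple[int, int, int], tuple[int, int, int]] | None:
--     class_tokens = {str(token).strip().lower() for token in classes if str(token).strip()}
--     if not class_tokens:
--         return None
--     dark_markers = ("dark", "night", "inverse", "invert")
--     light_markers = ("light", "day", "paper")
--     if any(any(marker in token for marker in dark_markers) for token in class_tokens):
--         return (245, 245, 245), (23, 23, 23)
--     if any(any(marker in token for marker in light_markers) for token in class_tokens):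
--         return (23, 23, 23), (250, 250, 250)
--     return None
-- ===== SOURCE B (Python) =====
-- def _class_inferred_contrast_pair(classes: list[str]) -> tuple[tuple[int, int, int], tuple[int, int, int]] | None:
--     # Join all normalized tokens into a single space-separated haystack and test each
--     # marker against that one string; no marker contains a space, so a marker can never
--     # straddle the " " joiner, making this equivalent to the per-token scans.
--     haystack = " ".join(
--         tok for tok in (str(token).strip().lower() for token in classes) if tok
--     )
--     if not haystack:
--         return None
--     for marker in ("dark", "night", "inverse", "invert"):
--         if marker in haystack:
--             return (245, 245, 245), (23, 23, 23)
--     for marker in ("light", "day", "paper"):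
--         if marker in haystack:
--             return (23, 23, 23), (250, 250, 250)
--     return None
-- ===== Notes on version B (the rewrite author's own statement) =====
-- stated objective: faster
-- what changed: Instead of building a set of tokens and scanning the tokens with nested any() per marker group, B concatenates all normalized tokens into one space-joined haystack string and tests each marker substring once against that single string (correct because no marker contains a space, so a match cannot straddle the joiner).
import Mathlib
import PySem

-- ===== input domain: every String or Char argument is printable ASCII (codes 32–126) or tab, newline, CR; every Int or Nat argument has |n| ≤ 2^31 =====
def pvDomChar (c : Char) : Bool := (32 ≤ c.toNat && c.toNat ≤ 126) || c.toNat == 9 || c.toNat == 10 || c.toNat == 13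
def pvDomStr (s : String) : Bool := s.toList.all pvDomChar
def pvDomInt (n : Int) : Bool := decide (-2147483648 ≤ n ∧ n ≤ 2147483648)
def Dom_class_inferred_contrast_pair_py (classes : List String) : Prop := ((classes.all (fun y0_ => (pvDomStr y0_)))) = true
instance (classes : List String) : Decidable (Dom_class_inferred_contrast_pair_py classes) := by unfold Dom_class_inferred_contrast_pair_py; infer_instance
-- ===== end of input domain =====

-- B joins all normalized tokens into one space-separated haystack and tests each marker
-- substring once against that single string (no marker contains a space, so a match can
-- never straddle the joiner); A builds a token set and scans it with nested any().
-- ===== PORT A =====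
def class_inferred_contrast_pair_py (classes : List String) : Option ((Int × Int × Int) × (Int × Int × Int)) :=
  let classTokens : PySem.Set String :=
    PySem.Set.ofList ((classes.filter (fun token => !(PySem.Str.strip token == ""))).map
      (fun token => PySem.Str.lower (PySem.Str.strip token)))
  if classTokens = [] then none
  else
    let darkMarkers : List String := ["dark", "night", "inverse", "invert"]
    let lightMarkers : List String := ["light", "day", "paper"]
    if classTokens.any (fun token => darkMarkers.any (fun marker => PySem.Str.isIn marker token)) then
      some ((245, 245, 245), (23, 23, 23))
    else if classTokens.any (fun token => lightMarkers.any (fun marker => PySem.Str.isIn marker token)) then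
      some ((23, 23, 23), (250, 250, 250))
    else none

-- ===== PORT B =====
def class_inferred_contrast_pair_py_alt (classes : List String) : Option ((Int × Int × Int) × (Int × Int × Int)) :=
  -- haystack = " ".join(tok for tok in (str(token).strip().lower() for token in classes) if tok)
  let haystack : String :=
    PySem.Str.join " " ((classes.map (fun token => PySem.Str.lower (PySem.Str.strip token))).filter
      (fun tok => !(tok == "")))
  if haystack == "" then none
  -- for marker in (...): if marker in haystack: return …   (first-hit loop = any)
  else if ["dark", "night", "inverse", "invert"].any (fun marker => PySem.Str.isIn marker haystack) then
    some ((245, 245, 245), (23, 23, 23))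
  else if ["light", "day", "paper"].any (fun marker => PySem.Str.isIn marker haystack) then
    some ((23, 23, 23), (250, 250, 250))
  else none

-- ===== PRECONDITION & SPEC =====
def Spec_class_inferred_contrast_pair_py (classes : List String) (out : Option ((Int × Int × Int) × (Int × Int × Int))) : Prop := out = class_inferred_contrast_pair_py_alt classes
instance (classes : List String) (out : Option ((Int × Int × Int) × (Int × Int × Int))) : Decidable (Spec_class_inferred_contrast_pair_py classes out) := by unfold Spec_class_inferred_contrast_pair_py; infer_instance

-- ===== CLAIM (what is proved, stated in full; the proofs are below) =====
def Claim_equal_class_inferred_contrast_pair_py : Prop := ∀ (classes : List String), Dom_class_inferred_contrast_pair_py classes → Spec_class_inferred_contrast_pair_py classes (class_inferred_contrast_pair_py classes)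

-- ===== LEMMAS AND PROOFS =====

-- Normalized token of a class string, and the two marker tests (proof-side abbreviations).
def pvTok (t : String) : String := PySem.Str.lower (PySem.Str.strip t)
def pvD (t : String) : Bool := ["dark", "night", "inverse", "invert"].any (fun marker => PySem.Str.isIn marker (pvTok t))
def pvL (t : String) : Bool := ["light", "day", "paper"].any (fun marker => PySem.Str.isIn marker (pvTok t))

theorem pvD_of_tok_empty (t : String) (h : pvTok t = "") : pvD t = false := by
  simp [pvD, h]; decide

theorem pvL_of_tok_empty (t : String) (h : pvTok t = "") : pvL t = false := by
  simp [pvL, h]; decide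

theorem pvTok_of_strip_empty (t : String) (h : PySem.Str.strip t = "") : pvTok t = "" := by
  rw [pvTok, h]; decide

-- a prefix of a ++ ' ' :: b that contains no space stops before the space
theorem pv_nospace_prefix (m a b : List Char) (hm : ' ' ∉ m) (h : m <+: a ++ ' ' :: b) :
    m <+: a := by
  have hlen : m.length ≤ a.length := by
    by_contra hgt
    rw [not_le] at hgt
    obtain ⟨t, ht⟩ := h
    have hidx : (m ++ t)[a.length]'(by rw [ht]; simp) = ' ' := by
      rw [List.getElem_of_eq ht]
      rw [List.getElem_append_right (le_refl a.length)]
      simp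
    rw [List.getElem_append_left hgt] at hidx
    exact hm (hidx ▸ List.getElem_mem _)
  exact List.prefix_of_prefix_length_le h (List.prefix_append a (' ' :: b)) hlen

-- an infix of a ++ ' ' :: b that contains no space lies in a or in b
theorem pv_nospace_infix (m : List Char) (hm : ' ' ∉ m) :
    ∀ a b : List Char, m <:+: a ++ ' ' :: b → m <:+: a ∨ m <:+: b := by
  intro a
  induction a with
  | nil =>
    intro b h
    rcases List.infix_cons_iff.mp h with hp | hi
    · cases m with
      | nil => exact Or.inl List.nil_infix
      | cons c m' =>
        rcases List.cons_prefix_cons.mp hp with ⟨hc, _⟩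
        exact absurd (by simp [hc]) hm
    · exact Or.inr hi
  | cons x a' ih =>
    intro b h
    rcases List.infix_cons_iff.mp h with hp | hi
    · cases m with
      | nil => exact Or.inl List.nil_infix
      | cons c m' =>
        rcases List.cons_prefix_cons.mp hp with ⟨hc, hp'⟩
        have hm' : ' ' ∉ m' := fun hx => hm (List.mem_cons_of_mem _ hx)
        have hpa : m' <+: a' := pv_nospace_prefix m' a' b hm' hp'
        exact Or.inl (List.IsPrefix.isInfix (List.cons_prefix_cons.mpr ⟨hc, hpa⟩))
    · rcases ih b hi with h1 | h2
      · exact Or.inl (List.infix_cons_iff.mpr (Or.inr h1))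
      · exact Or.inr h2

-- membership of a space-free nonempty pattern in a space-join = membership in some part
theorem pv_isIn_join (m : List Char) (hm : ' ' ∉ m) (hm0 : m ≠ []) :
    ∀ parts : List (List Char),
      PySem.Chars.isIn m (PySem.Chars.join [' '] parts) = parts.any (fun p => PySem.Chars.isIn m p) := by
  intro parts
  induction parts with
  | nil =>
    have hje : PySem.Chars.join [' '] ([] : List (List Char)) = [] := rfl
    rw [List.any_nil, hje, PySem.Chars.isIn_eq_false_iff]
    intro hinf
    exact hm0 (List.infix_nil.mp hinf)
  | cons p rest ih =>
    cases rest with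
    | nil => simp [PySem.Chars.join_singleton]
    | cons q rest' =>
      rw [PySem.Chars.join_cons_cons]
      have hApp : p ++ [' '] ++ PySem.Chars.join [' '] (q :: rest')
          = p ++ ' ' :: PySem.Chars.join [' '] (q :: rest') := by simp
      rw [hApp, Bool.eq_iff_iff, PySem.Chars.isIn_iff_infix]
      constructor
      · intro h
        rcases pv_nospace_infix m hm p (PySem.Chars.join [' '] (q :: rest')) h with h1 | h2
        · have h1' : PySem.Chars.isIn m p = true := (PySem.Chars.isIn_iff_infix m p).mpr h1
          simp [List.any_cons, h1']
        · have h3 : PySem.Chars.isIn m (PySem.Chars.join [' '] (q :: rest')) = true :=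
            (PySem.Chars.isIn_iff_infix _ _).mpr h2
          rw [ih] at h3
          simp [List.any_cons, h3]
      · intro h
        rw [List.any_cons, Bool.or_eq_true_iff] at h
        rcases h with h1 | h2
        · have hinf := (PySem.Chars.isIn_iff_infix m p).mp h1
          exact hinf.trans ⟨[], ' ' :: PySem.Chars.join [' '] (q :: rest'), by simp⟩
        · have h3 : PySem.Chars.isIn m (PySem.Chars.join [' '] (q :: rest')) = true := by
            rw [ih]; exact h2
          have hinf := (PySem.Chars.isIn_iff_infix _ _).mp h3
          exact hinf.trans ⟨p ++ [' '], [], by simp⟩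

-- lift to Str: one marker against the haystack vs against each part
theorem pv_isIn_haystack (m : String) (hm : ' ' ∉ m.toList) (hm0 : m.toList ≠ [])
    (parts : List String) :
    PySem.Str.isIn m (PySem.Str.join " " parts) = parts.any (fun p => PySem.Str.isIn m p) := by
  rw [PySem.Str.isIn_eq, PySem.Str.toList_join]
  have hsep : (" " : String).toList = [' '] := by decide
  rw [hsep, pv_isIn_join m.toList hm hm0, List.any_map]
  simp only [Function.comp_def, PySem.Str.isIn_eq]

-- a whole marker list against the haystack vs the nested scan over parts
theorem pv_marks_haystack (ms parts : List String)
    (hms : ∀ m ∈ ms, ' ' ∉ m.toList ∧ m.toList ≠ []) :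
    ms.any (fun m => PySem.Str.isIn m (PySem.Str.join " " parts))
      = parts.any (fun p => ms.any (fun m => PySem.Str.isIn m p)) := by
  rw [Bool.eq_iff_iff]
  simp only [List.any_eq_true]
  constructor
  · rintro ⟨m, hmem, hin⟩
    rw [pv_isIn_haystack m (hms m hmem).1 (hms m hmem).2 parts] at hin
    obtain ⟨p, hp, hin⟩ := List.any_eq_true.mp hin
    exact ⟨p, hp, m, hmem, hin⟩
  · rintro ⟨p, hp, m, hmem, hin⟩
    refine ⟨m, hmem, ?_⟩
    rw [pv_isIn_haystack m (hms m hmem).1 (hms m hmem).2 parts]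
    exact List.any_eq_true.mpr ⟨p, hp, hin⟩

theorem pv_any_ofList {α : Type} [BEq α] [LawfulBEq α] (xs : List α) (p : α → Bool) :
    (PySem.Set.ofList xs).any p = xs.any p := by
  rw [Bool.eq_iff_iff]
  simp only [List.any_eq_true]
  constructor
  · rintro ⟨x, hx, hp⟩
    exact ⟨x, (PySem.Set.mem_ofList xs x).mp hx, hp⟩
  · rintro ⟨x, hx, hp⟩
    exact ⟨x, (PySem.Set.mem_ofList xs x).mpr hx, hp⟩

theorem pv_guard_dark (t : String) :
    ((!(PySem.Str.strip t == "")) &&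
      (["dark", "night", "inverse", "invert"].any
        (fun marker => PySem.Str.isIn marker (PySem.Str.lower (PySem.Str.strip t))))) = pvD t := by
  by_cases h : PySem.Str.strip t = ""
  · simp [h, pvD_of_tok_empty t (pvTok_of_strip_empty t h)]
  · simp [h, pvD, pvTok]

theorem pv_guard_light (t : String) :
    ((!(PySem.Str.strip t == "")) &&
      (["light", "day", "paper"].any
        (fun marker => PySem.Str.isIn marker (PySem.Str.lower (PySem.Str.strip t))))) = pvL t := by
  by_cases h : PySem.Str.strip t = ""
  · simp [h, pvL_of_tok_empty t (pvTok_of_strip_empty t h)]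
  · simp [h, pvL, pvTok]

-- canonical form of A
theorem pv_a_eq (classes : List String) :
    class_inferred_contrast_pair_py classes =
      if classes.any pvD then some ((245, 245, 245), (23, 23, 23))
      else if classes.any pvL then some ((23, 23, 23), (250, 250, 250))
      else none := by
  unfold class_inferred_contrast_pair_py
  by_cases hE : PySem.Set.ofList
      ((classes.filter (fun token => !(PySem.Str.strip token == ""))).map
        (fun token => PySem.Str.lower (PySem.Str.strip token))) = ([] : List String)
  · rw [if_pos hE]
    have hfil : ∀ t ∈ classes, PySem.Str.strip t = "" := by
      intro t ht
      by_contra hne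
      have hmem : PySem.Str.lower (PySem.Str.strip t) ∈
          ((classes.filter (fun token => !(PySem.Str.strip token == ""))).map
            (fun token => PySem.Str.lower (PySem.Str.strip token))) :=
        List.mem_map_of_mem (List.mem_filter.mpr ⟨ht, by simp [hne]⟩)
      have := (PySem.Set.mem_ofList _ _).mpr hmem
      rw [hE] at this
      exact absurd this (List.not_mem_nil)
    have hD : classes.any pvD = false := by
      simp only [List.any_eq_false]
      intro t ht
      simp [pvD_of_tok_empty t (pvTok_of_strip_empty t (hfil t ht))]
    have hL : classes.any pvL = false := by
      simp only [List.any_eq_false]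
      intro t ht
      simp [pvL_of_tok_empty t (pvTok_of_strip_empty t (hfil t ht))]
    rw [hD, hL]
    simp
  · rw [if_neg hE]
    simp only [pv_any_ofList, List.any_map, Function.comp_def, List.any_filter,
      pv_guard_dark, pv_guard_light]

-- the parts list B joins: map-then-filter; its nested scan equals the per-class marker test
theorem pv_parts_any_dark (classes : List String) :
    ((classes.map (fun token => PySem.Str.lower (PySem.Str.strip token))).filter
        (fun tok => !(tok == ""))).any
      (fun p => ["dark", "night", "inverse", "invert"].any (fun m => PySem.Str.isIn m p))
      = classes.any pvD := by
  rw [List.filter_map, List.any_map, List.any_filter]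
  simp only [Function.comp_def]
  have h : ∀ t,
      ((!(PySem.Str.lower (PySem.Str.strip t) == "")) &&
        (["dark", "night", "inverse", "invert"].any
          (fun m => PySem.Str.isIn m (PySem.Str.lower (PySem.Str.strip t))))) = pvD t := by
    intro t
    by_cases h0 : pvTok t = ""
    · rw [show PySem.Str.lower (PySem.Str.strip t) = pvTok t from rfl, h0,
        pvD_of_tok_empty t h0]
      simp
    · rw [show PySem.Str.lower (PySem.Str.strip t) = pvTok t from rfl]
      simp [h0, pvD]
  exact List.any_congr rfl h

theorem pv_parts_any_light (classes : List String) :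
    ((classes.map (fun token => PySem.Str.lower (PySem.Str.strip token))).filter
        (fun tok => !(tok == ""))).any
      (fun p => ["light", "day", "paper"].any (fun m => PySem.Str.isIn m p))
      = classes.any pvL := by
  rw [List.filter_map, List.any_map, List.any_filter]
  simp only [Function.comp_def]
  have h : ∀ t,
      ((!(PySem.Str.lower (PySem.Str.strip t) == "")) &&
        (["light", "day", "paper"].any
          (fun m => PySem.Str.isIn m (PySem.Str.lower (PySem.Str.strip t))))) = pvL t := by
    intro t
    by_cases h0 : pvTok t = ""
    · rw [show PySem.Str.lower (PySem.Str.strip t) = pvTok t from rfl, h0,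
        pvL_of_tok_empty t h0]
      simp
    · rw [show PySem.Str.lower (PySem.Str.strip t) = pvTok t from rfl]
      simp [h0, pvL]
  exact List.any_congr rfl h

-- canonical form of B
theorem pv_b_eq (classes : List String) :
    class_inferred_contrast_pair_py_alt classes =
      if classes.any pvD then some ((245, 245, 245), (23, 23, 23))
      else if classes.any pvL then some ((23, 23, 23), (250, 250, 250))
      else none := by
  unfold class_inferred_contrast_pair_py_alt
  have hmsD : ∀ m ∈ (["dark", "night", "inverse", "invert"] : List String),
      ' ' ∉ m.toList ∧ m.toList ≠ [] := by decide
  have hmsL : ∀ m ∈ (["light", "day", "paper"] : List String),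
      ' ' ∉ m.toList ∧ m.toList ≠ [] := by decide
  have hD := pv_marks_haystack ["dark", "night", "inverse", "invert"]
    ((classes.map (fun token => PySem.Str.lower (PySem.Str.strip token))).filter
      (fun tok => !(tok == ""))) hmsD
  have hL := pv_marks_haystack ["light", "day", "paper"]
    ((classes.map (fun token => PySem.Str.lower (PySem.Str.strip token))).filter
      (fun tok => !(tok == ""))) hmsL
  rw [pv_parts_any_dark] at hD
  rw [pv_parts_any_light] at hL
  by_cases hE : PySem.Str.join " "
      ((classes.map (fun token => PySem.Str.lower (PySem.Str.strip token))).filter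
        (fun tok => !(tok == ""))) = ""
  · have hD0 : classes.any pvD = false := by
      rw [← hD, hE]
      decide
    have hL0 : classes.any pvL = false := by
      rw [← hL, hE]
      decide
    simp [hE, hD0, hL0]
  · simp only [hE, beq_iff_eq]
    rw [hD, hL]
    simp

-- ===== VERDICT (by name: the statement is the Claim_ definition above) =====
theorem class_inferred_contrast_pair_py_spec : Claim_equal_class_inferred_contrast_pair_py := by
  intro classes _
  unfold Spec_class_inferred_contrast_pair_py
  rw [pv_a_eq, pv_b_eq]
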